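-- pv_equiv track=rewrite | github.com/laurencebho/ned | ppr.py | get_disambiguations
-- ===== SOURCE A (Python) =====
-- def get_disambiguations(mentions):
--     disambiguations = {}
--     for mention, candidates in mentions.items():
--         best = 0
--         best_candidates = []
--         for candidate, score in candidates.items():
--             #add some code here to compute the product with initial similarity
--             if score > best:
--                 best = score
--                 best_candidates = [candidate]
--             elif score == best:
--                 best_candidates.append(candidate)
--         disambiguations[mention] = best_candidates
--     return disambiguations
-- ===== SOURCE B (Python) =====
-- def get_disambiguations(mentions):
--     disambiguations = {}
--     for mention, candidates in mentions.items():
--         best = max([0, *candidates.values()])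
--         disambiguations[mention] = [c for c, s in candidates.items() if s == best]
--     return disambiguations
-- ===== Notes on version B (the rewrite author's own statement) =====
-- stated objective: simpler
-- what changed: A's fused single pass tracking a running best and rebuilding/flushing the tie list is replaced by two sequential passes per mention: first compute best = max([0, *scores]), then keep the candidates whose score equals best via a comprehension.
import Mathlib
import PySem

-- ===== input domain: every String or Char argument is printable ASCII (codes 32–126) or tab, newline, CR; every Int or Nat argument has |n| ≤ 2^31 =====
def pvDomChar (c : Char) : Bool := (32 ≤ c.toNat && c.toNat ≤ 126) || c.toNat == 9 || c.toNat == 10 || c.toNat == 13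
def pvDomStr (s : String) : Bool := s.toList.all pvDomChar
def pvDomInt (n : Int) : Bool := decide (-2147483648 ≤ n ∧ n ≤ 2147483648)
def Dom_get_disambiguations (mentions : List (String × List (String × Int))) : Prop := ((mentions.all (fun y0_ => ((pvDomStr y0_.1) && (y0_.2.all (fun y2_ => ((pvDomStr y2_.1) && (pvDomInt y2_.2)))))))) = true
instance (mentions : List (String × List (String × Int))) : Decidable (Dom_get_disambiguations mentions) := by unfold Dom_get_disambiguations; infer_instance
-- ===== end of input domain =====

-- B replaces A's fused running-best pass with two passes per mention (max-with-0-floor, then filter equal-to-max): simpler, same cost.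


-- ===== PORT A =====
-- A's inner loop body: running (best, best_candidates) state
def pvStepA (st : Int × List String) (p : String × Int) : Int × List String :=
  if p.2 > st.1 then (p.2, [p.1])
  else if p.2 == st.1 then (st.1, st.2 ++ [p.1])
  else st

def get_disambiguations (mentions : List (String × List (String × Int))) : List (String × List String) :=
  (mentions.foldl
    (fun d q => d.insert q.1 ((q.2.foldl pvStepA (0, [])).2))
    (PySem.Dict.empty : PySem.Dict String (List String))).items

-- ===== PORT B =====
def get_disambiguations_alt (mentions : List (String × List (String × Int))) : List (String × List String) :=
  (mentions.foldl
    (fun d q =>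
      let best : Int := (q.2.map Prod.snd).foldl max 0
      d.insert q.1 ((q.2.filter (fun p => p.2 == best)).map Prod.fst))
    (PySem.Dict.empty : PySem.Dict String (List String))).items

-- ===== PRECONDITION & SPEC =====
def Spec_get_disambiguations (mentions : List (String × List (String × Int))) (out : List (String × List String)) : Prop := out = get_disambiguations_alt mentions
instance (mentions : List (String × List (String × Int))) (out : List (String × List String)) : Decidable (Spec_get_disambiguations mentions out) := by unfold Spec_get_disambiguations; infer_instance

-- ===== CLAIM (what is proved, stated in full; the proofs are below) =====
def Claim_equal_get_disambiguations : Prop := ∀ (mentions : List (String × List (String × Int))), Dom_get_disambiguations mentions → Spec_get_disambiguations mentions (get_disambiguations mentions)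

-- ===== LEMMAS AND PROOFS =====

theorem le_foldl_max (l : List Int) (b : Int) : b ≤ l.foldl max b := by
  induction l generalizing b with
  | nil => simp
  | cons x t ih => exact le_trans (le_max_left b x) (by simpa using ih (max b x))

theorem stepA_invariant (cs : List (String × Int)) (b : Int) (acc : List String) :
    cs.foldl pvStepA (b, acc) =
      ((cs.map Prod.snd).foldl max b,
       (if (cs.map Prod.snd).foldl max b = b then acc else []) ++
         (cs.filter (fun p => p.2 == (cs.map Prod.snd).foldl max b)).map Prod.fst) := by
  induction cs generalizing b acc with
  | nil => simp
  | cons p t ih =>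
    simp only [List.foldl_cons, List.map_cons, List.filter_cons]
    by_cases h1 : p.2 > b
    · have hmb : max b p.2 = p.2 := by omega
      have hM : p.2 ≤ (t.map Prod.snd).foldl max p.2 := le_foldl_max _ _
      simp only [pvStepA, if_pos h1]
      rw [ih]
      simp only [hmb]
      have hne : (t.map Prod.snd).foldl max p.2 ≠ b := by omega
      rw [if_neg hne]
      by_cases h2 : (t.map Prod.snd).foldl max p.2 = p.2
      · simp [h2]
      · have hf : (p.2 == (t.map Prod.snd).foldl max p.2) = false := by
          simp only [beq_eq_false_iff_ne, ne_eq]; omega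
        rw [if_neg h2]; simp [hf]
    · by_cases h2 : p.2 = b
      · have hmb : max b p.2 = b := by omega
        have hM : b ≤ (t.map Prod.snd).foldl max b := le_foldl_max _ _
        simp only [pvStepA, if_neg h1, beq_iff_eq, if_pos h2]
        rw [ih]; simp only [hmb]
        by_cases h3 : (t.map Prod.snd).foldl max b = b
        · simp [h3, h2]
        · have h4 : ¬ p.2 = (t.map Prod.snd).foldl max b := by omega
          simp [h3, h4]
      · have hlt : p.2 < b := by omega
        have hmb : max b p.2 = b := by omega
        have hM : b ≤ (t.map Prod.snd).foldl max b := le_foldl_max _ _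
        simp only [pvStepA, if_neg h1, beq_iff_eq, if_neg h2]
        rw [ih]; simp only [hmb]
        have h4 : ¬ p.2 = (t.map Prod.snd).foldl max b := by omega
        simp [h4]

theorem inner_eq (cs : List (String × Int)) :
    (cs.foldl pvStepA (0, [])).2 =
      (cs.filter (fun p => p.2 == (cs.map Prod.snd).foldl max 0)).map Prod.fst := by
  rw [stepA_invariant]
  split <;> simp

-- ===== VERDICT (by name: the statement is the Claim_ definition above) =====
theorem get_disambiguations_spec : Claim_equal_get_disambiguations := by
  intro mentions _
  unfold Spec_get_disambiguations get_disambiguations get_disambiguations_alt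
  congr 2
  funext d q
  simp only [inner_eq]
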